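-- pv_equiv track=rewrite | github.com/gbsouzadev/portfolioFlask | helpers.py | findNegativeSequences
-- ===== SOURCE A (Python) =====
-- def findNegativeSequences(lists):
--
--     sequenceList = []
--     lists.append("")
--     for i in range(len(lists) - 1):
--         item = lists[i]
--         tmp_list = []
--         count = 0
--
--         for nextItem in lists[i:]:
--             if nextItem == item:
--                 tmp_list.append(nextItem)
--                 count += 1
--             if nextItem != item and count >= 3:
--                 sequenceList.append(tmp_list)
--                 break
--             if nextItem != item and count < 3:
--                 break
--     return sequenceList
-- ===== SOURCE B (Python) =====
-- def findNegativeSequences(lists):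
--     # single pass over run-length structure; keeps A's lists.append("") mutation
--     lists.append("")
--     out = []
--     run_val = None
--     run_len = 0
--     started = False
--     for x in lists:
--         if started and x == run_val:
--             run_len += 1
--         else:
--             if started:
--                 for n in range(run_len, 2, -1):
--                     out.append([run_val] * n)
--             run_val, run_len, started = x, 1, True
--     # the final run (which absorbs the "" sentinel) is never closed, so it emits nothing
--     return out
-- ===== Notes on version B (the rewrite author's own statement) =====
-- stated objective: alternative
-- what changed: A restarts an inner scan at every index (re-walking each run once per start position); B does one single pass that run-length encodes the list and emits the [v]*L..[v]*3 sublists as each run closes, never closing the final sentinel-absorbing run.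
import Mathlib
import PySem

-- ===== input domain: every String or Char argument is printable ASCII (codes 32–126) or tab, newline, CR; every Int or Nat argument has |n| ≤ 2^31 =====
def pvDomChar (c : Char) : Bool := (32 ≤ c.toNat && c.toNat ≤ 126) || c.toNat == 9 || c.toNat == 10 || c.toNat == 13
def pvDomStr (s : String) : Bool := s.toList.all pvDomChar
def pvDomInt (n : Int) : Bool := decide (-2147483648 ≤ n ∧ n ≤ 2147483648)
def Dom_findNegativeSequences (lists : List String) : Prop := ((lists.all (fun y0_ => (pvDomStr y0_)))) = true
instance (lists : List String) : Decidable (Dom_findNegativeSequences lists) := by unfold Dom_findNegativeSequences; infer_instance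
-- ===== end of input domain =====

-- B replaces A's restart-at-every-index scan by a single run-length-encoding pass (objective: alternative).
-- Both Pythons mutate their argument (lists.append("")); the equivalence proved here is about the return value.

-- ===== PORT A =====
-- inner 'for nextItem in lists[i:]' loop of A: 'some t' exactly when A appends t to sequenceList
def pyInnerA (item : String) : List String → List String → Int → Option (List String)
  | [], _tmp, _count => none
  | x :: xs, tmp, count =>
    let tmp' := if x == item then tmp ++ [x] else tmp
    let count' := if x == item then count + 1 else count
    if x ≠ item ∧ 3 ≤ count' then some tmp'
    else if x ≠ item ∧ count' < 3 then none
    else pyInnerA item xs tmp' count'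

def findNegativeSequences (lists : List String) : List (List String) :=
  let L := lists ++ [""]
  (PySem.List.pyRange 0 (PySem.List.len L - 1) 1).foldl
    (fun acc i =>
      let item := PySem.List.pyGetD L i ""
      match pyInnerA item (PySem.List.slice L (some i) none) [] 0 with
      | some t => acc ++ [t]
      | none => acc)
    []

-- ===== PORT B =====
-- 'for n in range(run_len, 2, -1): out.append([run_val]*n)'
def emitRun (v : String) (len : Int) : List (List String) :=
  (PySem.List.pyRange len 2 (-1)).map (fun n => List.replicate n.toNat v)

-- the single pass of B: state = (run_val, run_len) once started, out accumulator
def bLoop : List String → Option (String × Int) → List (List String) → List (List String)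
  | [], _, out => out
  | x :: xs, some (v, k), out =>
      if x == v then bLoop xs (some (v, k + 1)) out
      else bLoop xs (some (x, 1)) (out ++ emitRun v k)
  | x :: xs, none, out => bLoop xs (some (x, 1)) out

def findNegativeSequences_alt (lists : List String) : List (List String) :=
  bLoop (lists ++ [""]) none []

-- ===== PRECONDITION & SPEC =====
def Spec_findNegativeSequences (lists : List String) (out : List (List String)) : Prop := out = findNegativeSequences_alt lists
instance (lists : List String) (out : List (List String)) : Decidable (Spec_findNegativeSequences lists out) := by unfold Spec_findNegativeSequences; infer_instance

-- ===== CLAIM (what is proved, stated in full; the proofs are below) =====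
def Claim_equal_findNegativeSequences : Prop := ∀ (lists : List String), Dom_findNegativeSequences lists → Spec_findNegativeSequences lists (findNegativeSequences lists)

-- ===== LEMMAS AND PROOFS =====

-- A's contribution at one start position, as a function of the suffix lists[i:]
def gA : List String → List (List String)
  | [] => []
  | a :: rest =>
    match pyInnerA a (a :: rest) [] 0 with
    | some t => [t]
    | none => []

-- A's whole loop over the suffixes of L
def FA (L : List String) : List (List String) :=
  (List.range (L.length - 1)).flatMap (fun k => gA (L.drop k))

theorem findNegativeSequences_eq_FA (lists : List String) :
    findNegativeSequences lists = FA (lists ++ [""]) := by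
  unfold findNegativeSequences
  set L := lists ++ [""] with hL
  have hlen1 : L.length = lists.length + 1 := by simp [hL]
  simp only [PySem.List.len_eq]
  have hcast : ((L.length : Int) - 1) = ((lists.length : Nat) : Int) := by
    rw [hlen1]; push_cast; ring
  rw [hcast, PySem.List.pyRange_zero_natCast, List.foldl_map]
  rw [PySem.List.foldl_congr_mem _ _ (fun acc k => acc ++ gA (L.drop k)) []
    (by
      intro acc k hk
      have hk' : k < L.length := by
        have := List.mem_range.mp hk; omega
      simp only [PySem.List.pyGetD_natCast, PySem.List.slice_from_natCast]
      rw [List.getD_eq_getElem L "" hk', List.drop_eq_getElem_cons hk']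
      simp only [gA]
      cases pyInnerA L[k] (L[k] :: L.drop (k + 1)) [] 0 <;> simp)]
  rw [PySem.List.foldl_append_eq_flatMap, FA, hlen1]
  simp

-- the inner loop on a run of j copies of a followed by a different element
theorem pyInnerA_replicate_stop (a b : String) (hb : b ≠ a) (bs : List String) :
    ∀ (j : Nat) (tmp : List String) (count : Int),
      pyInnerA a (List.replicate j a ++ b :: bs) tmp count =
        if 3 ≤ count + j then some (tmp ++ List.replicate j a) else none := by
  intro j
  induction j with
  | zero =>
      intro tmp count
      simp only [List.replicate, List.nil_append, pyInnerA, beq_iff_eq, hb, if_false,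
        ne_eq, not_false_eq_true, true_and, Nat.cast_zero, add_zero, List.append_nil]
      split_ifs with h1 h2
      · rfl
      · rfl
      · omega
  | succ j ih =>
      intro tmp count
      have hc : ((3:Int) ≤ count + 1 + j) ↔ (3 ≤ count + (j + 1 : Nat)) := by push_cast; omega
      simp [List.replicate_succ, pyInnerA, ih, hc, List.append_assoc]

-- the inner loop on a pure run (no terminator): never emits
theorem pyInnerA_replicate_nil (a : String) :
    ∀ (j : Nat) (tmp : List String) (count : Int),
      pyInnerA a (List.replicate j a) tmp count = none := by
  intro j
  induction j with
  | zero => intro tmp count; rfl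
  | succ j ih =>
      intro tmp count
      simp [List.replicate_succ, pyInnerA, ih]

theorem bLoop_out (l : List String) :
    ∀ st out, bLoop l st out = out ++ bLoop l st [] := by
  induction l with
  | nil => intro st out; simp [bLoop]
  | cons x xs ih =>
      intro st out
      match st with
      | none => simp only [bLoop]; exact ih _ _
      | some (v, k) =>
          by_cases h : x == v
          · simp only [bLoop, h, if_true]; exact ih _ _
          · simp only [bLoop, h, Bool.false_eq_true, if_false]
            rw [ih (some (x, 1)) (out ++ emitRun v k), ih (some (x, 1)) ([] ++ emitRun v k)]
            simp [List.append_assoc]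

theorem bLoop_replicate (a : String) :
    ∀ (m : Nat) (c : Int) (rest : List String) (out : List (List String)),
      bLoop (List.replicate m a ++ rest) (some (a, c)) out = bLoop rest (some (a, c + m)) out := by
  intro m
  induction m with
  | zero => intro c rest out; simp
  | succ m ih =>
      intro c rest out
      have : (c + 1) + (m : Int) = c + ((m + 1 : Nat) : Int) := by push_cast; omega
      simp [List.replicate_succ, bLoop, ih, this]

theorem emitRun_succ (a : String) (k : Nat) :
    emitRun a ((k + 1 : Nat) : Int) =
      (if 3 ≤ k + 1 then [List.replicate (k + 1) a] else []) ++ emitRun a (k : Int) := by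
  by_cases h3 : 3 ≤ k + 1
  · have h2 : (2 : Int) < ((k + 1 : Nat) : Int) := by exact_mod_cast (by omega : 2 < k + 1)
    rw [emitRun, PySem.List.pyRange_neg_one_cons h2]
    have heq : ((k + 1 : Nat) : Int) - 1 = (k : Int) := by push_cast; ring
    rw [heq]
    simp [emitRun, h3]
  · have hk1 : ((k : Int) + 1) ≤ 2 := by exact_mod_cast (by omega : k + 1 ≤ 2)
    have hk : ((k : Nat) : Int) ≤ 2 := by exact_mod_cast (by omega : k ≤ 2)
    simp [emitRun, PySem.List.pyRange_neg_one_eq_nil hk1, PySem.List.pyRange_neg_one_eq_nil hk, h3]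

theorem emitRun_natCast_eq (a : String) :
    ∀ (k : Nat),
      (List.range k).flatMap (fun i => if 3 ≤ k - i then [List.replicate (k - i) a] else []) =
        emitRun a (k : Int) := by
  intro k
  induction k with
  | zero => simp [emitRun, PySem.List.pyRange_neg_one_eq_nil (by omega : (0:Int) ≤ 2)]
  | succ k ih =>
      rw [List.range_succ_eq_map]
      simp only [List.flatMap_cons, List.flatMap_map, Nat.succ_eq_add_one]
      have h1 : ∀ i : Nat, (k + 1) - (i + 1) = k - i := by omega
      rw [emitRun_succ]
      simp only [h1]
      rw [ih]
      simp

theorem gA_replicate (a : String) (m : Nat) : gA (List.replicate m a) = [] := by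
  cases m with
  | zero => rfl
  | succ m =>
      rw [List.replicate_succ]
      simp only [gA, ← List.replicate_succ, pyInnerA_replicate_nil]

theorem gA_run_stop (a b : String) (hb : b ≠ a) (bs : List String) (m : Nat) :
    gA (List.replicate (m + 1) a ++ b :: bs) =
      if 3 ≤ m + 1 then [List.replicate (m + 1) a] else [] := by
  rw [List.replicate_succ, List.cons_append]
  simp only [gA, ← List.cons_append, ← List.replicate_succ,
    pyInnerA_replicate_stop a b hb bs (m + 1) [] 0]
  have hc : ((3:Int) ≤ 0 + ((m + 1 : Nat) : Int)) ↔ (3 ≤ m + 1) := by push_cast; omega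
  rw [if_congr hc rfl rfl]
  split_ifs <;> rfl

theorem dropWhile_cons_head_false {p : String → Bool} {l : List String} {b : String}
    {bs : List String} (h : l.dropWhile p = b :: bs) : p b = false := by
  induction l with
  | nil => simp at h
  | cons x xs ih =>
      rw [List.dropWhile_cons] at h
      by_cases hp : p x
      · simp [hp] at h; exact ih h
      · simp [hp] at h; rw [← h.1]; simpa using hp

theorem FA_eq_bLoop_aux : ∀ (n : Nat) (L : List String), L.length ≤ n → L ≠ [] →
    FA L = bLoop L none [] := by
  intro n
  induction n with
  | zero =>
      intro L hL hne
      cases L with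
      | nil => exact absurd rfl hne
      | cons a rest => simp at hL
  | succ n ih =>
      intro L hL hne
      obtain ⟨a, rest, rfl⟩ := List.exists_cons_of_ne_nil hne
      have hrest : rest.takeWhile (fun y => y == a) ++ rest.dropWhile (fun y => y == a) = rest :=
        List.takeWhile_append_dropWhile
      set t := rest.takeWhile (fun y => y == a) with ht
      set d := rest.dropWhile (fun y => y == a) with hd
      set m := t.length with hm
      have htrep : t = List.replicate m a := by
        apply List.eq_replicate_of_mem
        intro x hx
        have := List.mem_takeWhile_imp (ht ▸ hx)
        simpa using this
      have hL' : a :: rest = List.replicate (m + 1) a ++ d := by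
        rw [List.replicate_succ, List.cons_append, ← hrest, htrep]
      cases hdc : d with
      | nil =>
          -- one pure run: both sides are []
          rw [hdc] at hL'
          simp only [List.append_nil] at hL'
          rw [hL']
          have hFA : FA (List.replicate (m + 1) a) = [] := by
            rw [FA, List.flatMap_eq_nil_iff]
            intro k hk
            rw [List.drop_replicate, gA_replicate]
          rw [hFA, List.replicate_succ]
          simp only [bLoop]
          have := bLoop_replicate a m 1 [] []
          simp only [List.append_nil] at this
          rw [this, bLoop]
      | cons b bs =>
          have hba : (b == a) = false := dropWhile_cons_head_false (p := fun y => y == a) (hd.symm.trans hdc)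
          have hbne : b ≠ a := by simpa using hba
          -- length bookkeeping
          have hlen : (a :: rest).length - 1 = (m + 1) + bs.length := by
            have h0 : rest.length = m + (bs.length + 1) := by
              rw [← hrest, htrep, hdc]; simp
            simp [h0]; omega
          -- FA side
          have hFA : FA (a :: rest) = emitRun a ((m + 1 : Nat) : Int) ++ FA d := by
            rw [FA, hlen, List.range_add, List.flatMap_append, List.flatMap_map]
            have h1 : (List.range (m + 1)).flatMap (fun k => gA ((a :: rest).drop k)) =
                emitRun a ((m + 1 : Nat) : Int) := by
              rw [← emitRun_natCast_eq a (m + 1)]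
              apply List.flatMap_congr
              intro k hk
              have hk' : k ≤ m + 1 := by
                have := List.mem_range.mp hk; omega
              rw [hL', List.drop_append_of_le_length (by simpa using hk'), List.drop_replicate, hdc]
              have : m + 1 - k = (m + 1 - k - 1) + 1 := by
                have := List.mem_range.mp hk; omega
              rw [this, gA_run_stop a b hbne bs]
            have h2 : (List.range bs.length).flatMap
                  (fun j => gA ((a :: rest).drop (m + 1 + j))) = FA d := by
              rw [FA, hdc]
              simp only [List.length_cons, Nat.add_sub_cancel]
              apply List.flatMap_congr
              intro j hj
              rw [hL']
              have : m + 1 + j = (List.replicate (m + 1) a).length + j := by simp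
              rw [this, List.drop_length_add_append, hdc]
            rw [h1, h2]
          -- bLoop side
          have hB : bLoop (a :: rest) none [] = emitRun a ((m + 1 : Nat) : Int) ++ bLoop d none [] := by
            have hc : (1 : Int) + (m : Int) = ((m + 1 : Nat) : Int) := by push_cast; ring
            simp only [bLoop]
            rw [← hrest, htrep, bLoop_replicate, hc, hdc]
            simp only [bLoop, hba, Bool.false_eq_true, if_false, List.nil_append]
            rw [bLoop_out]
          rw [hFA, hB]
          have hdlen : d.length ≤ n := by
            have h1 : rest.length ≤ n := by simpa using hL
            have h2 : d.length ≤ rest.length := by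
              rw [← hrest]; simp
            omega
          rw [ih d hdlen (by rw [hdc]; simp)]

theorem FA_eq_bLoop : ∀ (L : List String), L ≠ [] → FA L = bLoop L none [] := by
  intro L hne
  exact FA_eq_bLoop_aux L.length L le_rfl hne

theorem main_eq (lists : List String) :
    findNegativeSequences lists = findNegativeSequences_alt lists := by
  rw [findNegativeSequences_eq_FA, findNegativeSequences_alt,
      FA_eq_bLoop (lists ++ [""]) (by simp)]

-- ===== VERDICT (by name: the statement is the Claim_ definition above) =====
theorem findNegativeSequences_spec : Claim_equal_findNegativeSequences := by
  intro lists _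
  unfold Spec_findNegativeSequences
  exact main_eq lists
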